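-- pv_equiv track=rewrite | github.com/emorskeemor/obg-v4 | obg/core/statistics.py | subject_block_count
-- ===== SOURCE A (Python) =====
-- from typing import Any, Dict, Iterable, List, Tuple, Callable, Set
--
-- def subject_block_count(option_codes:List[str], blocks:List[List[str]]):
--     '''
--     count the occurances of options in a given set of blocks
--     '''
--     counts = dict.fromkeys(option_codes, 0)
--
--     for option in option_codes:
--         value = counts.get(option, None)
--         occurances = 0
--         for block in blocks:
--             if block is None:
--                 continue
--             if option in block:
--                 occurances += 1
--         counts[option] = value + occurances
--     return counts
-- ===== SOURCE B (Python) =====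
-- def subject_block_count(option_codes, blocks):
--     """count the occurrences of options in a given set of blocks"""
--     occurrences = {}
--     for block in blocks:
--         for code in set(block):
--             occurrences[code] = occurrences.get(code, 0) + 1
--     counts = dict.fromkeys(option_codes, 0)
--     for option in option_codes:
--         counts[option] += occurrences.get(option, 0)
--     return counts
-- ===== Notes on version B (the rewrite author's own statement) =====
-- stated objective: faster
-- what changed: Instead of rescanning every block once per entry of option_codes (A's nested option-by-option passes), B builds a block-occurrence index in one pass over the blocks (one increment per distinct code per block) and then fills the counts with one pass over option_codes.
import Mathlib
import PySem

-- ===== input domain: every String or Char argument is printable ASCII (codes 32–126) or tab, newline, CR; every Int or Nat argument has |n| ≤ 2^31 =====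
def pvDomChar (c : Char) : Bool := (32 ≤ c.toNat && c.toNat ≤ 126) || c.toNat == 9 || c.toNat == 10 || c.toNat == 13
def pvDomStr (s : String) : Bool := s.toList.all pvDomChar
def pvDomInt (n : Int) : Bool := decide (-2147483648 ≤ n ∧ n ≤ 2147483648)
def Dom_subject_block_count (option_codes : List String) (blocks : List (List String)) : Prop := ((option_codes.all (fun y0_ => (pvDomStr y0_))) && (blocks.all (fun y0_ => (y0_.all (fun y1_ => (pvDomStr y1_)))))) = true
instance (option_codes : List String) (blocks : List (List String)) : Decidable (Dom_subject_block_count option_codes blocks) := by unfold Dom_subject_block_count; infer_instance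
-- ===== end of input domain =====

-- B builds a block-occurrence index in one pass over the blocks and then fills the counts with one
-- pass over option_codes, replacing A's option-by-option rescans of every block (objective: faster).

-- ===== PORT A =====
-- A's 'if block is None: continue' is unreachable here (blocks : List (List String) holds no None) and is omitted.
def subject_block_count (option_codes : List String) (blocks : List (List String)) : List (String × Int) :=
  -- counts = dict.fromkeys(option_codes, 0)
  let counts : PySem.Dict String Int :=
    option_codes.foldl (fun d k => d.insert k 0) PySem.Dict.empty
  let counts :=
    option_codes.foldl (fun d option =>
      -- value = counts.get(option, None): the key is always present, so value is its int
      let value : Int := ((d.get? option).getD 0)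
      let occurances : Int :=
        blocks.foldl (fun acc block => if option ∈ block then acc + 1 else acc) 0
      d.insert option (value + occurances)) counts
  counts.items

-- ===== PORT B =====
def subject_block_count_alt (option_codes : List String) (blocks : List (List String)) : List (String × Int) :=
  let occurrences : PySem.Dict String Int :=
    blocks.foldl (fun d block =>
      (PySem.Set.ofList block).foldl (fun d code => d.insert code (d.getD code 0 + 1)) d)
      PySem.Dict.empty
  let counts : PySem.Dict String Int :=
    option_codes.foldl (fun d k => d.insert k 0) PySem.Dict.empty
  let counts :=
    option_codes.foldl (fun d option =>
      d.insert option (d.getD option 0 + occurrences.getD option 0)) counts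
  counts.items

-- ===== PRECONDITION & SPEC =====
def Spec_subject_block_count (option_codes : List String) (blocks : List (List String)) (out : List (String × Int)) : Prop := out = subject_block_count_alt option_codes blocks
instance (option_codes : List String) (blocks : List (List String)) (out : List (String × Int)) : Decidable (Spec_subject_block_count option_codes blocks out) := by unfold Spec_subject_block_count; infer_instance

-- ===== CLAIM (what is proved, stated in full; the proofs are below) =====
def Claim_equal_subject_block_count : Prop := ∀ (option_codes : List String) (blocks : List (List String)), Dom_subject_block_count option_codes blocks → Spec_subject_block_count option_codes blocks (subject_block_count option_codes blocks)

-- ===== LEMMAS AND PROOFS =====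

-- a dict whose items are the keys K tabulated by a value function f
def sbcTable (K : List String) (f : String → Int) : PySem.Dict String Int :=
  PySem.Dict.mk (K.map (fun x => (x, f x)))

lemma sbcTable_keys (K : List String) (f : String → Int) : (sbcTable K f).keys = K := by
  simp [sbcTable, PySem.Dict.keys, Function.comp_def]

lemma sbcTable_contains (K : List String) (f : String → Int) (k : String) :
    (sbcTable K f).contains k = decide (k ∈ K) := by
  rw [PySem.Dict.contains_eq_decide_mem_keys, sbcTable_keys]

lemma sbcTable_get? (K : List String) (f : String → Int) (k : String)
    (hK : K.Nodup) (hk : k ∈ K) : (sbcTable K f).get? k = some (f k) := by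
  apply PySem.Dict.get?_of_mem_items
  · exact List.mem_map.mpr ⟨k, hk, rfl⟩
  · rw [sbcTable_keys]; exact hK

lemma sbcTable_insert (K : List String) (f : String → Int) (k : String) (v : Int)
    (hk : k ∈ K) :
    (sbcTable K f).insert k v = sbcTable K (fun x => if x = k then v else f x) := by
  apply PySem.Dict.ext
  rw [PySem.Dict.items_insert_of_contains]
  · show (K.map (fun x => (x, f x))).map _ = _
    rw [List.map_map]
    apply List.map_congr_left
    intro x hx
    by_cases hxk : x = k <;> simp [hxk]
  · rw [sbcTable_contains]; simpa using hk

lemma sbcTable_congr (K : List String) (f g : String → Int)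
    (h : ∀ x ∈ K, f x = g x) : sbcTable K f = sbcTable K g := by
  unfold sbcTable
  congr 1
  apply List.map_congr_left
  intro x hx
  rw [h x hx]

lemma sbc_fromkeys (l : List String) :
    ∀ (s : List String), s.Nodup →
    l.foldl (fun d k => d.insert k 0) (sbcTable s (fun _ => 0))
      = sbcTable (PySem.Set.update s l) (fun _ => (0 : Int)) := by
  induction l with
  | nil => intro s hs; rfl
  | cons k t ih =>
    intro s hs
    simp only [List.foldl_cons]
    by_cases hk : k ∈ s
    · rw [sbcTable_insert s _ k 0 hk,
        sbcTable_congr s _ (fun _ => 0) (by intro x hx; by_cases h : x = k <;> simp [h]),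
        ih s hs]
      have : PySem.Set.update s (k :: t) = PySem.Set.update (PySem.Set.add s k) t := rfl
      rw [this]
      simp [PySem.Set.add, PySem.Set.contains, hk]
    · have hc : (sbcTable s (fun _ => 0)).contains k = false := by
        rw [sbcTable_contains]; simpa using hk
      have : (sbcTable s (fun _ => (0:Int))).insert k 0 = sbcTable (s ++ [k]) (fun _ => 0) := by
        apply PySem.Dict.ext
        rw [PySem.Dict.items_insert_of_not_contains _ _ hc]
        simp [sbcTable]
      rw [this, ih (s ++ [k]) (by simp [List.nodup_append, hs]; intro a ha h; exact hk (h ▸ ha))]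
      have : PySem.Set.update s (k :: t) = PySem.Set.update (s ++ [k]) t := by
        show PySem.Set.update (PySem.Set.add s k) t = _
        simp [PySem.Set.add, PySem.Set.contains, hk]
      rw [this]

def sbcOcc (blocks : List (List String)) (o : String) : Int :=
  blocks.foldl (fun acc block => if o ∈ block then acc + 1 else acc) 0

lemma sbcOcc_shift (blocks : List (List String)) (x : String) :
    ∀ (c : Int), blocks.foldl (fun acc block => if x ∈ block then acc + 1 else acc) c
      = c + sbcOcc blocks x := by
  induction blocks with
  | nil => intro c; simp [sbcOcc]
  | cons b bs ih =>
    intro c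
    have h0 : sbcOcc (b :: bs) x = (if x ∈ b then (0:Int) + 1 else 0) + sbcOcc bs x := by
      simp only [sbcOcc, List.foldl_cons]; exact ih _
    rw [List.foldl_cons, ih, h0]
    by_cases hb : x ∈ b <;> simp only [hb, if_true, if_false] <;> ring

lemma sbcOcc_cons (b : List String) (bs : List (List String)) (x : String) :
    sbcOcc (b :: bs) x = (if x ∈ b then 1 else 0) + sbcOcc bs x := by
  simp only [sbcOcc, List.foldl_cons]
  by_cases hb : x ∈ b <;> simp [hb, sbcOcc_shift bs x]

-- A's outer loop over option_codes, on a table keyed by the distinct codes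
lemma sbc_foldA (blocks : List (List String)) (K : List String) (hK : K.Nodup) :
    ∀ (l : List String), (∀ o ∈ l, o ∈ K) → ∀ (g : String → Int),
    l.foldl (fun d option =>
        d.insert option (((d.get? option).getD 0) +
          blocks.foldl (fun acc block => if option ∈ block then acc + 1 else acc) 0))
      (sbcTable K g)
      = sbcTable K (fun x => g x + (l.count x : Int) * sbcOcc blocks x) := by
  intro l
  induction l with
  | nil =>
    intro _ g
    simp only [List.foldl_nil]
    apply sbcTable_congr; intro x hx; simp
  | cons o t ih =>
    intro hmem g
    have ho : o ∈ K := hmem o (by simp)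
    simp only [List.foldl_cons]
    rw [sbcTable_get? K g o hK ho]
    have hfold : blocks.foldl (fun acc block => if o ∈ block then acc + 1 else acc) 0
        = sbcOcc blocks o := rfl
    rw [hfold, sbcTable_insert K g o _ ho,
      ih (fun x hx => hmem x (by simp [hx])) _]
    apply sbcTable_congr
    intro x hx
    by_cases hxo : x = o
    · subst hxo
      simp only [List.count_cons_self, Option.getD_some]
      push_cast
      ring
    · rw [if_neg hxo, List.count_cons_of_ne (by intro h; exact hxo h.symm)]

-- B's fill loop over option_codes, adding a fixed weight w per occurrence of the code
lemma sbc_fill (K : List String) (hK : K.Nodup) (w : String → Int) :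
    ∀ (l : List String), (∀ o ∈ l, o ∈ K) → ∀ (g : String → Int),
    l.foldl (fun d option => d.insert option (d.getD option 0 + w option)) (sbcTable K g)
      = sbcTable K (fun x => g x + (l.count x : Int) * w x) := by
  intro l
  induction l with
  | nil =>
    intro _ g
    simp only [List.foldl_nil]
    apply sbcTable_congr; intro x hx; simp
  | cons o t ih =>
    intro hmem g
    have ho : o ∈ K := hmem o (by simp)
    simp only [List.foldl_cons]
    rw [PySem.Dict.getD_eq_get?_getD, sbcTable_get? K g o hK ho,
      sbcTable_insert K g o _ ho, ih (fun x hx => hmem x (by simp [hx])) _]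
    apply sbcTable_congr
    intro x hx
    by_cases hxo : x = o
    · subst hxo
      simp only [List.count_cons_self, Option.getD_some]
      push_cast
      ring
    · rw [if_neg hxo, List.count_cons_of_ne (by intro h; exact hxo h.symm)]

-- B's occurrence index: one pass over the blocks, +1 per distinct code of each block
lemma sbc_occ_getD (blocks : List (List String)) :
    ∀ (d : PySem.Dict String Int) (x : String),
    (blocks.foldl (fun d block =>
        (PySem.Set.ofList block).foldl (fun d code => d.insert code (d.getD code 0 + 1)) d)
      d).getD x 0 = d.getD x 0 + sbcOcc blocks x := by
  induction blocks with
  | nil => intro d x; simp [sbcOcc]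
  | cons b bs ih =>
    intro d x
    simp only [List.foldl_cons]
    rw [ih, PySem.Dict.getD_foldl_insert_add_one, sbcOcc_cons]
    have hcount : ((PySem.Set.ofList b).count x : Int) = if x ∈ b then 1 else 0 := by
      by_cases hb : x ∈ b
      · rw [List.count_eq_one_of_mem (PySem.Set.nodup_ofList b)
          ((PySem.Set.mem_ofList b x).mpr hb)]
        simp [hb]
      · rw [List.count_eq_zero_of_not_mem (fun h => hb ((PySem.Set.mem_ofList b x).mp h))]
        simp [hb]
    rw [hcount]
    ring

lemma sbc_update_nil (l : List String) :
    PySem.Set.update [] l = PySem.Set.ofList l := by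
  rw [PySem.Set.ofList_eq_foldl]; rfl

lemma sbc_A_eq (option_codes : List String) (blocks : List (List String)) :
    subject_block_count option_codes blocks
      = ((PySem.Set.ofList option_codes).map
          (fun x => (x, (option_codes.count x : Int) * sbcOcc blocks x))) := by
  show (List.foldl _ ((option_codes.foldl (fun d k => d.insert k 0) (sbcTable [] (fun _ => 0)))) option_codes).items = _
  rw [sbc_fromkeys option_codes [] List.nodup_nil, sbc_update_nil,
    sbc_foldA blocks (PySem.Set.ofList option_codes) (PySem.Set.nodup_ofList option_codes)
      option_codes (fun o ho => (PySem.Set.mem_ofList option_codes o).mpr ho)]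
  show (PySem.Set.ofList option_codes).map _ = _
  apply List.map_congr_left
  intro x hx
  simp

lemma sbc_B_eq (option_codes : List String) (blocks : List (List String)) :
    subject_block_count_alt option_codes blocks
      = ((PySem.Set.ofList option_codes).map
          (fun x => (x, (option_codes.count x : Int) * sbcOcc blocks x))) := by
  show (List.foldl _ ((option_codes.foldl (fun d k => d.insert k 0) (sbcTable [] (fun _ => 0)))) option_codes).items = _
  rw [sbc_fromkeys option_codes [] List.nodup_nil, sbc_update_nil,
    sbc_fill (PySem.Set.ofList option_codes) (PySem.Set.nodup_ofList option_codes)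
      _ option_codes (fun o ho => (PySem.Set.mem_ofList option_codes o).mpr ho)]
  show (PySem.Set.ofList option_codes).map _ = _
  apply List.map_congr_left
  intro x hx
  simp [sbc_occ_getD, PySem.Dict.getD_empty]

-- ===== VERDICT (by name: the statement is the Claim_ definition above) =====
theorem subject_block_count_spec : Claim_equal_subject_block_count := by
  intro oc bl _
  show subject_block_count oc bl = subject_block_count_alt oc bl
  rw [sbc_A_eq, sbc_B_eq]
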